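-- pv_equiv track=rewrite | github.com/valentjn/advent-of-code-2022 | 15/15.py | ComputeComplementOfIntervalUnion
-- ===== SOURCE A (Python) =====
-- from typing import Dict, List, Optional, Sequence, Tuple
--
-- def ComputeComplementOfIntervalUnion(intervals: Sequence[Tuple[int, int]]) -> Tuple[int, List[Tuple[int, int]], int]:
--   if len(intervals) == 0: return 0, [], 0
--   events = sorted(event for interval in intervals for event in ((interval[0], True), (interval[1], False))
--                   if interval[0] < interval[1])
--   complementIntervals: List[Tuple[int, int]] = []
--   numberOfCurrentIntervals = 0
--   previousX = None
--
--   for x, isStart in events: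
--     if (numberOfCurrentIntervals == 0) and (previousX is not None) and (x - previousX >= 2):
--       complementIntervals.append((previousX + 1, x - 1))
--
--     previousX = x
--
--     if isStart:
--       numberOfCurrentIntervals += 1
--     else:
--       numberOfCurrentIntervals -= 1
--
--   return events[0][0] - 1, complementIntervals, events[-1][0] + 1
-- ===== SOURCE B (Python) =====
-- def ComputeComplementOfIntervalUnion(intervals):
--   if len(intervals) == 0:
--     return 0, [], 0
--   valid = sorted(interval for interval in intervals if interval[0] < interval[1])
--   firstStart, curEnd = valid[0]
--   gaps = []
--   for s, e in valid[1:]: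
--     if s <= curEnd + 1:
--       if e > curEnd:
--         curEnd = e
--     else:
--       gaps.append((curEnd + 1, s - 1))
--       curEnd = e
--   return firstStart - 1, gaps, curEnd + 1
-- ===== Notes on version B (the rewrite author's own statement) =====
-- stated objective: alternative
-- what changed: Replaces the 2n-event sweep (sorted start/end events with an open-interval counter and previous-x gap test) by the classic interval-merge: sort the n valid intervals by (start,end) and fold once keeping a single merged region [firstStart,curEnd], emitting a gap whenever the next start exceeds curEnd+1.
import Mathlib
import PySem

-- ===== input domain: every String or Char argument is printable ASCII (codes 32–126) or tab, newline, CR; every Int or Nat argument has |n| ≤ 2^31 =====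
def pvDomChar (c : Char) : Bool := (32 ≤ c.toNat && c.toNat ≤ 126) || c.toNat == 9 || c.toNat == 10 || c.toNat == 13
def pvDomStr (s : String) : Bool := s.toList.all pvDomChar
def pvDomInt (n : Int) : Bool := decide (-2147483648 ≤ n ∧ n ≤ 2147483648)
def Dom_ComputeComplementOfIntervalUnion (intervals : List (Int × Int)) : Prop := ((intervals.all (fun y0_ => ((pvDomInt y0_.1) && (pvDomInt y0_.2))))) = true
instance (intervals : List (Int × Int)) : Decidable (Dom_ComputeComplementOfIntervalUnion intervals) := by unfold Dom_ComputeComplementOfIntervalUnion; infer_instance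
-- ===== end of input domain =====

-- B replaces A's 2n-event sweep (sorted start/end events + open counter) by the classic
-- sort-then-merge fold over the n valid intervals (alternative algorithm, same asymptotics).


-- ===== PORT A =====
-- the event list: (start, True) and (end, False) for every interval with start < end
def pvEventsOf (intervals : List (Int × Int)) : List (Int × Bool) :=
  intervals.flatMap (fun iv => if iv.1 < iv.2 then [(iv.1, true), (iv.2, false)] else [])

-- one iteration of A's for-loop over the sorted events
def pvStepA (st : (List (Int × Int)) × Int × Option Int) (ev : Int × Bool) :
    (List (Int × Int)) × Int × Option Int :=
  let g := match st.2.2 with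
    | some p => if st.2.1 = 0 ∧ ev.1 - p ≥ 2 then st.1 ++ [(p + 1, ev.1 - 1)] else st.1
    | none => st.1
  (g, (if ev.2 then st.2.1 + 1 else st.2.1 - 1), some ev.1)

def ComputeComplementOfIntervalUnion (intervals : List (Int × Int)) : Int × (List (Int × Int)) × Int :=
  if intervals.length = 0 then (0, [], 0) else
  let events := PySem.List.sorted2 (pvEventsOf intervals) (fun ev => ev.1) (fun ev => ev.2)
  let st := events.foldl pvStepA ([], 0, none)
  -- events[0] / events[-1]: none = IndexError (events empty), excluded by Pre_
  match PySem.List.pyGet? events 0, PySem.List.pyGet? events (-1) with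
  | some e0, some eL => (e0.1 - 1, st.1, eL.1 + 1)
  | _, _ => (0, [], 0)

-- ===== PORT B =====
-- one iteration of B's merge loop: extend the current region or emit a gap
def pvStepB (st : (List (Int × Int)) × Int) (iv : Int × Int) : (List (Int × Int)) × Int :=
  if iv.1 ≤ st.2 + 1 then (st.1, if iv.2 > st.2 then iv.2 else st.2)
  else (st.1 ++ [(st.2 + 1, iv.1 - 1)], iv.2)

def ComputeComplementOfIntervalUnion_alt (intervals : List (Int × Int)) : Int × (List (Int × Int)) × Int :=
  if intervals.length = 0 then (0, [], 0) else
  let valid := PySem.List.sorted2 (intervals.filter (fun iv => iv.1 < iv.2)) (fun iv => iv.1) (fun iv => iv.2)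
  -- valid[0]: none = IndexError (no valid interval), excluded by Pre_
  match PySem.List.pyGet? valid 0 with
  | some v0 =>
    let st := (PySem.List.slice valid (some 1) none).foldl pvStepB ([], v0.2)
    (v0.1 - 1, st.1, st.2 + 1)
  | none => (0, [], 0)

-- ===== PRECONDITION & SPEC =====
-- Pre_ excludes exactly the inputs on which the Python raises IndexError (both A and B do):
-- a nonempty list in which no interval has start < end.
def Pre_ComputeComplementOfIntervalUnion (intervals : List (Int × Int)) : Prop :=
  intervals = [] ∨ ∃ iv ∈ intervals, iv.1 < iv.2
instance (intervals : List (Int × Int)) : Decidable (Pre_ComputeComplementOfIntervalUnion intervals) := by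
  unfold Pre_ComputeComplementOfIntervalUnion; infer_instance

def pvWitness_ComputeComplementOfIntervalUnion : (List (Int × Int)) := [(0, 2), (5, 7)]

def Spec_ComputeComplementOfIntervalUnion (intervals : List (Int × Int)) (out : Int × (List (Int × Int)) × Int) : Prop := out = ComputeComplementOfIntervalUnion_alt intervals
instance (intervals : List (Int × Int)) (out : Int × (List (Int × Int)) × Int) : Decidable (Spec_ComputeComplementOfIntervalUnion intervals out) := by unfold Spec_ComputeComplementOfIntervalUnion; infer_instance

-- ===== CLAIM (what is proved, stated in full; the proofs are below) =====
def Claim_equal_ComputeComplementOfIntervalUnion : Prop := ∀ (intervals : List (Int × Int)), Dom_ComputeComplementOfIntervalUnion intervals → Pre_ComputeComplementOfIntervalUnion intervals → Spec_ComputeComplementOfIntervalUnion intervals (ComputeComplementOfIntervalUnion intervals)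

-- ===== LEMMAS AND PROOFS =====

-- integer-point coverage by the valid intervals: interval (s,e) with s < e covers s..e
def pvCov (ivs : List (Int × Int)) (x : Int) : Prop :=
  ∃ iv ∈ ivs, iv.1 < iv.2 ∧ iv.1 ≤ x ∧ x ≤ iv.2

def pvCovCount (ivs : List (Int × Int)) (x : Int) : Int :=
  ((ivs.filter (fun iv => decide (iv.1 < iv.2) && decide (iv.1 ≤ x) && decide (x ≤ iv.2))).length : Int)

-- number of start events with value ≤ y / end events with value < y
def pvSle (E : List (Int × Bool)) (y : Int) : Int :=
  ((E.filter (fun ev => ev.2 && decide (ev.1 ≤ y))).length : Int)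
def pvFlt (E : List (Int × Bool)) (y : Int) : Int :=
  ((E.filter (fun ev => !ev.2 && decide (ev.1 < y))).length : Int)

-- a maximal uncovered integer run
def pvGapOK (ivs : List (Int × Int)) (ab : Int × Int) : Prop :=
  ab.1 ≤ ab.2 ∧ (∀ y, ab.1 ≤ y → y ≤ ab.2 → ¬ pvCov ivs y) ∧
  pvCov ivs (ab.1 - 1) ∧ pvCov ivs (ab.2 + 1)

-- invariant for the gap list built so far: maximal runs, strictly increasing, all below p,
-- complete for every uncovered point below p that has a covered point below it
def pvGapsBelow (ivs : List (Int × Int)) (g : List (Int × Int)) (p : Int) : Prop :=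
  g.Pairwise (fun a b => a.1 < b.1) ∧ (∀ ab ∈ g, pvGapOK ivs ab ∧ ab.2 < p) ∧
  (∀ x, x < p → ¬ pvCov ivs x → (∃ y, y < x ∧ pvCov ivs y) → ∃ ab ∈ g, ab.1 ≤ x ∧ x ≤ ab.2)

-- the complete sorted list of maximal uncovered runs (what both programs compute)
def pvIsGaps (ivs : List (Int × Int)) (g : List (Int × Int)) : Prop :=
  g.Pairwise (fun a b => a.1 < b.1) ∧ (∀ ab ∈ g, pvGapOK ivs ab) ∧
  (∀ x, ¬ pvCov ivs x → (∃ y, y < x ∧ pvCov ivs y) → (∃ y, x < y ∧ pvCov ivs y) →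
    ∃ ab ∈ g, ab.1 ≤ x ∧ x ≤ ab.2)

-- sorted2 with two keys is sorted with the lexicographic key
lemma pv_sorted2_eq {α κ₁ κ₂ : Type} [LinearOrder κ₁] [LinearOrder κ₂]
    (xs : List α) (k1 : α → κ₁) (k2 : α → κ₂) :
    PySem.List.sorted2 xs k1 k2 false =
      PySem.List.sorted xs (fun a => toLex (k1 a, k2 a)) false := by
  have hbefore : (fun a b => decide (k1 a < k1 b) || (!decide (k1 b < k1 a) && decide (k2 a < k2 b)))
      = (fun a b => decide ((fun a => toLex (k1 a, k2 a)) a < (fun a => toLex (k1 a, k2 a)) b)) := by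
    funext a b
    rcases lt_trichotomy (k1 a) (k1 b) with h | h | h
    · simp [Prod.Lex.toLex_lt_toLex, h]
    · simp [Prod.Lex.toLex_lt_toLex, h]
    · simp [Prod.Lex.toLex_lt_toLex, h, h.ne', lt_asymm h]
  simp only [PySem.List.sorted2, PySem.List.sorted, if_neg (Bool.false_ne_true), hbefore]

lemma pv_sorted2_pairwise_fst {κ₂ : Type} [LinearOrder κ₂] (xs : List (Int × κ₂)) :
    (PySem.List.sorted2 xs (fun a => a.1) (fun a => a.2) false).Pairwise
      (fun a b => a.1 ≤ b.1) := by
  rw [pv_sorted2_eq]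
  refine (PySem.List.sorted_pairwise xs (fun a => toLex (a.1, a.2))).imp ?_
  intro a b h
  rw [Prod.Lex.toLex_le_toLex] at h
  rcases h with h | ⟨h, _⟩
  · exact le_of_lt h
  · exact le_of_eq h

lemma pvSle_cons (ev : Int × Bool) (E : List (Int × Bool)) (y : Int) :
    pvSle (ev :: E) y = (if ev.2 ∧ ev.1 ≤ y then 1 else 0) + pvSle E y := by
  simp only [pvSle, List.filter_cons]
  by_cases h1 : ev.2 <;> by_cases h2 : ev.1 ≤ y <;> simp [h1, h2] <;> push_cast <;> omega

lemma pvFlt_cons (ev : Int × Bool) (E : List (Int × Bool)) (y : Int) :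
    pvFlt (ev :: E) y = (if ¬ ev.2 ∧ ev.1 < y then 1 else 0) + pvFlt E y := by
  simp only [pvFlt, List.filter_cons]
  by_cases h1 : ev.2 <;> by_cases h2 : ev.1 < y <;> simp [h1, h2] <;> push_cast <;> omega

lemma pvSle_perm {E₁ E₂ : List (Int × Bool)} (h : E₁.Perm E₂) (y : Int) :
    pvSle E₁ y = pvSle E₂ y := by
  simp only [pvSle, ← List.countP_eq_length_filter]
  rw [h.countP_eq]

lemma pvFlt_perm {E₁ E₂ : List (Int × Bool)} (h : E₁.Perm E₂) (y : Int) :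
    pvFlt E₁ y = pvFlt E₂ y := by
  simp only [pvFlt, ← List.countP_eq_length_filter]
  rw [h.countP_eq]

lemma pvSle_eq_zero (E : List (Int × Bool)) (y : Int) (h : ∀ ev ∈ E, y < ev.1) :
    pvSle E y = 0 := by
  have : E.filter (fun ev => ev.2 && decide (ev.1 ≤ y)) = [] := by
    rw [List.filter_eq_nil_iff]
    intro ev hev
    simp [not_le.mpr (h ev hev)]
  simp [pvSle, this]

lemma pvFlt_eq_zero (E : List (Int × Bool)) (y : Int) (h : ∀ ev ∈ E, y ≤ ev.1) :
    pvFlt E y = 0 := by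
  have : E.filter (fun ev => !ev.2 && decide (ev.1 < y)) = [] := by
    rw [List.filter_eq_nil_iff]
    intro ev hev
    simp [not_lt.mpr (h ev hev)]
  simp [pvFlt, this]

lemma pvCovCount_eq_zero_iff (ivs : List (Int × Int)) (x : Int) :
    pvCovCount ivs x = 0 ↔ ¬ pvCov ivs x := by
  simp [pvCovCount, pvCov, List.filter_eq_nil_iff]

-- counting bridge: start/end event counts recover the coverage count
lemma pvBridge (ivs : List (Int × Int)) (y : Int) :
    pvCovCount ivs y = pvSle (pvEventsOf ivs) y - pvFlt (pvEventsOf ivs) y := by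
  induction ivs with
  | nil => simp [pvCovCount, pvSle, pvFlt, pvEventsOf]
  | cons iv t ih =>
    have hc : pvCovCount (iv :: t) y =
        (if iv.1 < iv.2 ∧ iv.1 ≤ y ∧ y ≤ iv.2 then 1 else 0) + pvCovCount t y := by
      simp only [pvCovCount, List.filter_cons]
      by_cases h1 : iv.1 < iv.2 <;> by_cases h2 : iv.1 ≤ y <;> by_cases h3 : y ≤ iv.2 <;>
        simp [h1, h2, h3] <;> push_cast <;> omega
    by_cases hv : iv.1 < iv.2
    · have he : pvEventsOf (iv :: t) = (iv.1, true) :: (iv.2, false) :: pvEventsOf t := by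
        simp [pvEventsOf, hv]
      rw [hc, he, pvSle_cons, pvSle_cons, pvFlt_cons, pvFlt_cons, ih]
      simp only []
      by_cases h2 : iv.1 ≤ y <;> by_cases h3 : y ≤ iv.2 <;> by_cases h4 : iv.2 < y <;>
        simp [hv, h2, h3, h4] <;> omega
    · have he : pvEventsOf (iv :: t) = pvEventsOf t := by
        simp [pvEventsOf, hv]
      rw [hc, he, ih]
      simp [hv]

lemma pv_mem_eventsOf {ev : Int × Bool} {ivs : List (Int × Int)} (h : ev ∈ pvEventsOf ivs) :
    ∃ iv ∈ ivs, iv.1 < iv.2 ∧ (ev = (iv.1, true) ∨ ev = (iv.2, false)) := by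
  simp only [pvEventsOf, List.mem_flatMap] at h
  obtain ⟨iv, hiv, hmem⟩ := h
  by_cases hv : iv.1 < iv.2
  · simp only [if_pos hv, List.mem_cons] at hmem
    rcases hmem with h | h | h
    · exact ⟨iv, hiv, hv, Or.inl h⟩
    · exact ⟨iv, hiv, hv, Or.inr h⟩
    · simp at h
  · simp [hv] at hmem

lemma pv_eventsOf_mem {iv : Int × Int} {ivs : List (Int × Int)} (h : iv ∈ ivs) (hv : iv.1 < iv.2) :
    (iv.1, true) ∈ pvEventsOf ivs ∧ (iv.2, false) ∈ pvEventsOf ivs := by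
  constructor
  · simp only [pvEventsOf, List.mem_flatMap]
    exact ⟨iv, h, by simp [hv]⟩
  · simp only [pvEventsOf, List.mem_flatMap]
    exact ⟨iv, h, by simp [hv]⟩

lemma pv_cov_of_mem_eventsOf {ev : Int × Bool} {ivs : List (Int × Int)}
    (h : ev ∈ pvEventsOf ivs) : pvCov ivs ev.1 := by
  obtain ⟨iv, hiv, hv, hcase⟩ := pv_mem_eventsOf h
  rcases hcase with rfl | rfl
  · exact ⟨iv, hiv, hv, le_refl _, le_of_lt hv⟩
  · exact ⟨iv, hiv, hv, le_of_lt hv, le_refl _⟩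

-- ===== the sweep invariant (A's loop) =====
lemma pvSweepInv (ivs : List (Int × Int)) :
    ∀ (Q : List (Int × Bool)) (g : List (Int × Int)) (k p : Int),
    Q.Pairwise (fun a b => a.1 ≤ b.1) →
    (∀ ev ∈ Q, p ≤ ev.1) →
    (∀ y, p < y → pvCovCount ivs y = k + pvSle Q y - pvFlt Q y) →
    pvCov ivs p →
    (∀ ev ∈ Q, pvCov ivs ev.1) →
    pvGapsBelow ivs g p →
    ∃ pL, p ≤ pL ∧ (∀ ev ∈ Q, ev.1 ≤ pL) ∧
      pvGapsBelow ivs (Q.foldl pvStepA (g, k, some p)).1 pL := by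
  intro Q
  induction Q with
  | nil =>
    intro g k p _ _ _ _ _ hg
    exact ⟨p, le_refl _, by simp, hg⟩
  | cons ev Q' ih =>
    intro g k p hsorted hlow hcnt hp hcov hg
    obtain ⟨x, bx⟩ := ev
    have hpx : p ≤ x := hlow (x, bx) List.mem_cons_self
    have hpw := List.pairwise_cons.mp hsorted
    have hcovx : pvCov ivs x := hcov (x, bx) List.mem_cons_self
    -- coverage count of points strictly between p and x equals k
    have hky : ∀ y, p < y → y < x → pvCovCount ivs y = k := by
      intro y h1 h2
      rw [hcnt y h1,
        pvSle_eq_zero _ _ (by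
          intro ev hev
          rcases List.mem_cons.mp hev with rfl | hev'
          · exact h2
          · exact lt_of_lt_of_le h2 (hpw.1 ev hev')),
        pvFlt_eq_zero _ _ (by
          intro ev hev
          rcases List.mem_cons.mp hev with rfl | hev'
          · exact le_of_lt h2
          · exact le_trans (le_of_lt h2) (hpw.1 ev hev'))]
      ring
    obtain ⟨gpw, gmem, gcomp⟩ := hg
    -- the new gap accumulator after this step
    have hstep : List.foldl pvStepA (g, k, some p) ((x, bx) :: Q')
        = List.foldl pvStepA
            ((if k = 0 ∧ x - p ≥ 2 then g ++ [(p + 1, x - 1)] else g),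
             (if bx then k + 1 else k - 1), some x) Q' := by
      simp [List.foldl_cons, pvStepA]
    have hg' : pvGapsBelow ivs
        (if k = 0 ∧ x - p ≥ 2 then g ++ [(p + 1, x - 1)] else g) x := by
      by_cases hemit : k = 0 ∧ x - p ≥ 2
      · rw [if_pos hemit]
        have hnew : pvGapOK ivs (p + 1, x - 1) := by
          refine ⟨by omega, ?_, by simpa using hp, by simpa using hcovx⟩
          intro y h1 h2 hcy
          simp only at h1 h2
          exact ((pvCovCount_eq_zero_iff ivs y).mp
            (by rw [hky y (by omega) (by omega), hemit.1])) hcy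
        refine ⟨?_, ?_, ?_⟩
        · rw [List.pairwise_append]
          refine ⟨gpw, by simp, ?_⟩
          intro ab hab cd hcd
          simp only [List.mem_singleton] at hcd
          subst hcd
          have h1 : ab.1 ≤ ab.2 := (gmem ab hab).1.1
          have h2 := (gmem ab hab).2
          show ab.1 < p + 1
          omega
        · intro ab hab
          rcases List.mem_append.mp hab with h | h
          · obtain ⟨h1, h2⟩ := gmem ab h
            exact ⟨h1, by omega⟩
          · simp at h
            subst h
            exact ⟨hnew, by show x - 1 < x; omega⟩
        · intro x' h1 h2 h3
          by_cases hx'p : x' < p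
          · obtain ⟨ab, hab, h4⟩ := gcomp x' hx'p h2 h3
            exact ⟨ab, List.mem_append_left _ hab, h4⟩
          · have hx'ne : x' ≠ p := fun h => h2 (h ▸ hp)
            refine ⟨(p + 1, x - 1), List.mem_append_right _ (by simp), by simp; omega⟩
      · rw [if_neg hemit]
        refine ⟨gpw, ?_, ?_⟩
        · intro ab hab
          obtain ⟨h1, h2⟩ := gmem ab hab
          exact ⟨h1, by omega⟩
        · intro x' h1 h2 h3
          by_cases hx'p : x' < p
          · exact gcomp x' hx'p h2 h3
          · exfalso
            have hx'ne : x' ≠ p := fun h => h2 (h ▸ hp)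
            have hk0 : pvCovCount ivs x' = k := hky x' (by omega) h1
            have := (pvCovCount_eq_zero_iff ivs x').mpr h2
            exact hemit ⟨by omega, by omega⟩
    have hcnt' : ∀ y, x < y →
        pvCovCount ivs y = (if bx then k + 1 else k - 1) + pvSle Q' y - pvFlt Q' y := by
      intro y hy
      have hxy : x ≤ y := le_of_lt hy
      have := hcnt y (by omega)
      rw [pvSle_cons, pvFlt_cons] at this
      cases bx <;> simp [hxy, hy] at this ⊢ <;> omega
    obtain ⟨pL, hppL, hQle, hGB⟩ := ih
      (if k = 0 ∧ x - p ≥ 2 then g ++ [(p + 1, x - 1)] else g)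
      (if bx then k + 1 else k - 1) x hpw.2 hpw.1 hcnt' hcovx
      (fun ev hev => hcov ev (List.mem_cons_of_mem _ hev)) hg'
    refine ⟨pL, le_trans hpx hppL, ?_, by rw [hstep]; exact hGB⟩
    intro ev hev
    rcases List.mem_cons.mp hev with rfl | hev'
    · exact hppL
    · exact hQle ev hev'

-- ===== the merge invariant (B's loop) =====
lemma pvStepB_acc (rest : List (Int × Int)) (g : List (Int × Int)) (c : Int) :
    rest.foldl pvStepB (g, c) =
      (g ++ (rest.foldl pvStepB ([], c)).1, (rest.foldl pvStepB ([], c)).2) := by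
  induction rest generalizing g c with
  | nil => simp
  | cons iv t ih =>
    simp only [List.foldl_cons]
    by_cases h : iv.1 ≤ c + 1
    · simp only [pvStepB, if_pos h]
      exact ih g _
    · simp only [pvStepB, if_neg h]
      simp only [List.nil_append]
      rw [ih (g ++ [(c + 1, iv.1 - 1)]) iv.2, ih [(c + 1, iv.1 - 1)] iv.2]
      simp

lemma pvMergeInv (ivs : List (Int × Int)) :
    ∀ (rest : List (Int × Int)) (L c : Int),
    L ≤ c →
    rest.Pairwise (fun a b => a.1 ≤ b.1) →
    (∀ iv ∈ rest, iv.1 < iv.2) →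
    (∀ iv ∈ rest, L ≤ iv.1) →
    (∀ x, L ≤ x → x ≤ c → pvCov ivs x) →
    (∀ iv ∈ rest, ∀ x, iv.1 ≤ x → x ≤ iv.2 → pvCov ivs x) →
    (∀ x, pvCov ivs x → x ≤ c ∨ ∃ iv ∈ rest, iv.1 ≤ x ∧ x ≤ iv.2) →
    (c ≤ (rest.foldl pvStepB ([], c)).2) ∧
    (∀ iv ∈ rest, iv.2 ≤ (rest.foldl pvStepB ([], c)).2) ∧
    ((rest.foldl pvStepB ([], c)).2 = c ∨ ∃ iv ∈ rest, (rest.foldl pvStepB ([], c)).2 = iv.2) ∧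
    (rest.foldl pvStepB ([], c)).1.Pairwise (fun a b => a.1 < b.1) ∧
    (∀ ab ∈ (rest.foldl pvStepB ([], c)).1, pvGapOK ivs ab ∧ c < ab.1) ∧
    (∀ x, c < x → ¬ pvCov ivs x → (∃ y, x < y ∧ pvCov ivs y) →
      ∃ ab ∈ (rest.foldl pvStepB ([], c)).1, ab.1 ≤ x ∧ x ≤ ab.2) := by
  intro rest
  induction rest with
  | nil =>
    intro L c hLc _ _ _ hreg _ hup
    refine ⟨le_refl _, by simp, Or.inl rfl, by simp, by simp, ?_⟩
    intro x hcx hncov ⟨y, hxy, hcovy⟩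
    rcases hup y hcovy with h | h
    · omega
    · simp at h
  | cons hd t ih =>
    intro L c hLc hsorted hvalid hlow hreg hdown hup
    obtain ⟨s, e⟩ := hd
    have hse : s < e := hvalid (s, e) List.mem_cons_self
    have hLs : L ≤ s := hlow (s, e) List.mem_cons_self
    have hpw := List.pairwise_cons.mp hsorted
    by_cases hm : s ≤ c + 1
    · -- merge: region extends to c2
      have hstep : List.foldl pvStepB ([], c) ((s, e) :: t)
          = List.foldl pvStepB ([], if e > c then e else c) t := by
        simp [List.foldl_cons, pvStepB, hm]
      set c2 : Int := if e > c then e else c with hc2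
      have hcc2 : c ≤ c2 := by rw [hc2]; split_ifs <;> omega
      have hec2 : e ≤ c2 := by rw [hc2]; split_ifs <;> omega
      have hc2or : c2 = c ∨ c2 = e := by rw [hc2]; split_ifs <;> simp
      have hc2gt : c < c2 → c2 = e := by rw [hc2]; split_ifs <;> omega
      have IH := ih L c2 (le_trans hLc hcc2) hpw.2
        (fun iv hiv => hvalid iv (List.mem_cons_of_mem _ hiv))
        (fun iv hiv => hlow iv (List.mem_cons_of_mem _ hiv))
        (by
          intro x hLx hxc2
          by_cases hxc : x ≤ c
          · exact hreg x hLx hxc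
          · have he : c2 = e := hc2gt (by omega)
            exact hdown (s, e) List.mem_cons_self x (by omega) (by omega))
        (fun iv hiv => hdown iv (List.mem_cons_of_mem _ hiv))
        (by
          intro x hcov
          rcases hup x hcov with h | ⟨iv, hiv, h1, h2⟩
          · exact Or.inl (by omega)
          · rcases List.mem_cons.mp hiv with rfl | hiv'
            · exact Or.inl (by omega)
            · exact Or.inr ⟨iv, hiv', h1, h2⟩)
      rw [hstep]
      obtain ⟨i1, i2, i3, i4, i5, i6⟩ := IH
      refine ⟨le_trans hcc2 i1, ?_, ?_, i4, ?_, ?_⟩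
      · intro iv hiv
        rcases List.mem_cons.mp hiv with rfl | hiv'
        · exact le_trans hec2 i1
        · exact i2 iv hiv'
      · rcases i3 with h | ⟨iv, hiv, h⟩
        · rcases hc2or with h2 | h2
          · exact Or.inl (by omega)
          · exact Or.inr ⟨(s, e), List.mem_cons_self, by omega⟩
        · exact Or.inr ⟨iv, List.mem_cons_of_mem _ hiv, h⟩
      · intro ab hab
        obtain ⟨h1, h2⟩ := i5 ab hab
        exact ⟨h1, by omega⟩
      · intro x hcx hncov hab
        by_cases hxc2 : x ≤ c2
        · exfalso
          have he : c2 = e := hc2gt (by omega)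
          exact hncov (hdown (s, e) List.mem_cons_self x (by omega) (by omega))
        · exact i6 x (by omega) hncov hab
    · -- gap: emit (c+1, s-1), new region [s, e]
      have hstep : List.foldl pvStepB ([], c) ((s, e) :: t)
          = ((c + 1, s - 1) :: (List.foldl pvStepB ([], e) t).1,
             (List.foldl pvStepB ([], e) t).2) := by
        simp only [List.foldl_cons, pvStepB, if_neg hm]
        simp only [List.nil_append]
        rw [pvStepB_acc t [(c + 1, s - 1)] e]
        simp
      have IH := ih s e (le_of_lt hse) hpw.2
        (fun iv hiv => hvalid iv (List.mem_cons_of_mem _ hiv))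
        (fun iv hiv => (hpw.1 iv hiv))
        (fun x h1 h2 => hdown (s, e) List.mem_cons_self x h1 h2)
        (fun iv hiv => hdown iv (List.mem_cons_of_mem _ hiv))
        (by
          intro x hcov
          rcases hup x hcov with h | ⟨iv, hiv, h1, h2⟩
          · exact Or.inl (by omega)
          · rcases List.mem_cons.mp hiv with rfl | hiv'
            · exact Or.inl (by omega)
            · exact Or.inr ⟨iv, hiv', h1, h2⟩)
      rw [hstep]
      obtain ⟨i1, i2, i3, i4, i5, i6⟩ := IH
      have hgapOK : pvGapOK ivs (c + 1, s - 1) := by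
        refine ⟨by omega, ?_, ?_, ?_⟩
        · intro y h1 h2 hcov
          rcases hup y hcov with h | ⟨iv, hiv, hy1, hy2⟩
          · simp at h1 h2; omega
          · rcases List.mem_cons.mp hiv with rfl | hiv'
            · simp at hy1 h2; omega
            · have := hpw.1 iv hiv'
              simp at hy1 h2; omega
        · simpa using hreg c hLc le_rfl
        · simpa using hdown (s, e) List.mem_cons_self s le_rfl (le_of_lt hse)
      refine ⟨by omega, ?_, ?_, ?_, ?_, ?_⟩
      · intro iv hiv
        rcases List.mem_cons.mp hiv with rfl | hiv'
        · simpa using i1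
        · exact i2 iv hiv'
      · rcases i3 with h | ⟨iv, hiv, h⟩
        · exact Or.inr ⟨(s, e), List.mem_cons_self, by simpa using h⟩
        · exact Or.inr ⟨iv, List.mem_cons_of_mem _ hiv, h⟩
      · refine List.pairwise_cons.mpr ⟨?_, i4⟩
        intro ab hab
        have := (i5 ab hab).2
        simp; omega
      · intro ab hab
        rcases List.mem_cons.mp hab with rfl | hab'
        · exact ⟨hgapOK, by simp⟩
        · obtain ⟨h1, h2⟩ := i5 ab hab'
          exact ⟨h1, by omega⟩
      · intro x hcx hncov habove
        by_cases hxs : x ≤ s - 1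
        · exact ⟨(c + 1, s - 1), List.mem_cons_self, by simp; omega⟩
        · have hxe : e < x := by
            by_contra hxe
            exact hncov (hdown (s, e) List.mem_cons_self x (by omega) (by omega))
          obtain ⟨ab, hab, h1, h2⟩ := i6 x hxe hncov habove
          exact ⟨ab, List.mem_cons_of_mem _ hab, h1, h2⟩

-- ===== uniqueness of the maximal-run list =====
lemma pv_mem_of_gapOK {ivs : List (Int × Int)} {g : List (Int × Int)} {ab : Int × Int}
    (hg : pvIsGaps ivs g) (h : pvGapOK ivs ab) : ab ∈ g := by
  obtain ⟨hab, hunc, hcl, hcr⟩ := h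
  obtain ⟨-, hmem, hcomp⟩ := hg
  obtain ⟨cd, hcd, h1, h2⟩ := hcomp ab.1 (hunc ab.1 le_rfl hab)
    ⟨ab.1 - 1, by omega, hcl⟩ ⟨ab.2 + 1, by omega, hcr⟩
  obtain ⟨hcd12, hcdunc, hcdl, hcdr⟩ := hmem cd hcd
  -- cd.1 = ab.1
  have e1 : cd.1 = ab.1 := by
    by_contra hne
    have : cd.1 ≤ ab.1 - 1 := by omega
    exact hcdunc (ab.1 - 1) this (by omega) hcl
  -- cd.2 = ab.2
  have e2 : cd.2 = ab.2 := by
    by_contra hne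
    rcases lt_or_gt_of_ne hne with hlt | hgt
    · exact hunc (cd.2 + 1) (by omega) (by omega) hcdr
    · exact hcdunc (ab.2 + 1) (by omega) (by omega) hcr
  have : cd = ab := Prod.ext e1 e2
  rwa [this] at hcd

lemma pv_sorted_mem_eq : ∀ (g₁ g₂ : List (Int × Int)),
    g₁.Pairwise (fun a b => a.1 < b.1) → g₂.Pairwise (fun a b => a.1 < b.1) →
    (∀ ab, ab ∈ g₁ ↔ ab ∈ g₂) → g₁ = g₂ := by
  intro g₁
  induction g₁ with
  | nil =>
    intro g₂ _ _ hm
    cases g₂ with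
    | nil => rfl
    | cons b t => exact absurd ((hm b).mpr (List.mem_cons_self)) (List.not_mem_nil)
  | cons a t ih =>
    intro g₂ h₁ h₂ hm
    cases g₂ with
    | nil => exact absurd ((hm a).mp List.mem_cons_self) (List.not_mem_nil)
    | cons b t₂ =>
      have hab : a = b := by
        have ha : a ∈ b :: t₂ := (hm a).mp List.mem_cons_self
        have hb : b ∈ a :: t := (hm b).mpr List.mem_cons_self
        rcases List.mem_cons.mp ha with h | h
        · exact h
        · rcases List.mem_cons.mp hb with h' | h'
          · exact h'.symm
          · have := (List.pairwise_cons.mp h₂).1 a h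
            have := (List.pairwise_cons.mp h₁).1 b h'
            omega
      subst hab
      congr 1
      refine ih t₂ (List.pairwise_cons.mp h₁).2 (List.pairwise_cons.mp h₂).2 ?_
      intro ab
      constructor
      · intro hab
        have := (hm ab).mp (List.mem_cons_of_mem _ hab)
        rcases List.mem_cons.mp this with h | h
        · subst h
          have := (List.pairwise_cons.mp h₁).1 ab hab
          omega
        · exact h
      · intro hab
        have := (hm ab).mpr (List.mem_cons_of_mem _ hab)
        rcases List.mem_cons.mp this with h | h
        · subst h
          have := (List.pairwise_cons.mp h₂).1 ab hab
          omega
        · exact h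

lemma pvIsGaps_unique {ivs : List (Int × Int)} {g₁ g₂ : List (Int × Int)}
    (h₁ : pvIsGaps ivs g₁) (h₂ : pvIsGaps ivs g₂) : g₁ = g₂ :=
  pv_sorted_mem_eq g₁ g₂ h₁.1 h₂.1 (fun ab =>
    ⟨fun h => pv_mem_of_gapOK h₂ (h₁.2.1 ab h), fun h => pv_mem_of_gapOK h₁ (h₂.2.1 ab h)⟩)

-- ===== A = B on Pre_ =====
theorem pvMain (ivs : List (Int × Int)) (hpre : ivs = [] ∨ ∃ iv ∈ ivs, iv.1 < iv.2) :
    ComputeComplementOfIntervalUnion ivs = ComputeComplementOfIntervalUnion_alt ivs := by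
  rcases hpre with rfl | ⟨iv0, hiv0, hv0⟩
  · rfl
  · have hlen : ¬ ivs.length = 0 := by
      simp only [List.length_eq_zero_iff]
      rintro rfl; simp at hiv0
    -- the two sorted lists
    set F := ivs.filter (fun iv => iv.1 < iv.2) with hFdef
    set V := PySem.List.sorted2 F (fun iv => iv.1) (fun iv => iv.2) with hVdef
    set E := PySem.List.sorted2 (pvEventsOf ivs) (fun ev => ev.1) (fun ev => ev.2) with hEdef
    have hVperm : V.Perm F := PySem.List.sorted2_perm _ _ _ _
    have hEperm : E.Perm (pvEventsOf ivs) := PySem.List.sorted2_perm _ _ _ _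
    have hVpw : V.Pairwise (fun a b => a.1 ≤ b.1) := pv_sorted2_pairwise_fst F
    have hEpw : E.Pairwise (fun a b => a.1 ≤ b.1) := pv_sorted2_pairwise_fst _
    have hVmem : ∀ iv : Int × Int, iv ∈ V ↔ iv ∈ ivs ∧ iv.1 < iv.2 := by
      intro iv
      rw [hVperm.mem_iff, hFdef, List.mem_filter]
      simp
    have hEmem : ∀ ev : Int × Bool, ev ∈ E ↔ ev ∈ pvEventsOf ivs := fun ev => hEperm.mem_iff
    have hVne : V ≠ [] := by
      intro h
      exact absurd ((hVmem iv0).mpr ⟨hiv0, hv0⟩) (by simp [h])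
    have hEne : E ≠ [] := by
      intro h
      exact absurd ((hEmem (iv0.1, true)).mpr (pv_eventsOf_mem hiv0 hv0).1) (by simp [h])
    obtain ⟨v0, rest, hV⟩ := List.exists_cons_of_ne_nil hVne
    obtain ⟨e0, Qt, hE⟩ := List.exists_cons_of_ne_nil hEne
    have hv0V : v0 ∈ V := by rw [hV]; exact List.mem_cons_self
    have hv0ivs : v0 ∈ ivs ∧ v0.1 < v0.2 := (hVmem v0).mp hv0V
    have hVlow : ∀ iv ∈ V, v0.1 ≤ iv.1 := by
      intro iv hiv
      rw [hV] at hiv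
      rcases List.mem_cons.mp hiv with rfl | h
      · exact le_refl _
      · rw [hV] at hVpw; exact (List.pairwise_cons.mp hVpw).1 iv h
    have hElow : ∀ ev ∈ E, e0.1 ≤ ev.1 := by
      intro ev hev
      rw [hE] at hev
      rcases List.mem_cons.mp hev with rfl | h
      · exact le_refl _
      · rw [hE] at hEpw; exact (List.pairwise_cons.mp hEpw).1 ev h
    -- last event of E
    set eL := E.getLast hEne with heL
    have hsplitE : E = E.dropLast ++ [eL] := (List.dropLast_append_getLast hEne).symm
    have hEhigh : ∀ ev ∈ E, ev.1 ≤ eL.1 := by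
      intro ev hev
      rw [hsplitE] at hev
      have hpw2 := hEpw
      rw [hsplitE, List.pairwise_append] at hpw2
      rcases List.mem_append.mp hev with h | h
      · exact hpw2.2.2 ev h eL (by simp)
      · simp at h; rw [h]
    have heLE : eL ∈ E := List.getLast_mem hEne
    -- coverage transfer
    have hcovV : ∀ x, pvCov ivs x ↔ ∃ iv ∈ V, iv.1 ≤ x ∧ x ≤ iv.2 := by
      intro x
      constructor
      · rintro ⟨iv, hiv, hv, h1, h2⟩
        exact ⟨iv, (hVmem iv).mpr ⟨hiv, hv⟩, h1, h2⟩
      · rintro ⟨iv, hiv, h1, h2⟩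
        obtain ⟨hi, hv⟩ := (hVmem iv).mp hiv
        exact ⟨iv, hi, hv, h1, h2⟩
    -- ===== run the sweep invariant over E =====
    have hstep0 : pvStepA ([], 0, none) e0 = ([], if e0.2 then (1 : Int) else -1, some e0.1) := by
      simp [pvStepA]
    have hcnt0 : ∀ y, e0.1 < y →
        pvCovCount ivs y = (if e0.2 then (1 : Int) else -1) + pvSle Qt y - pvFlt Qt y := by
      intro y hy
      rw [pvBridge ivs y, ← pvSle_perm hEperm y, ← pvFlt_perm hEperm y, hE,
        pvSle_cons, pvFlt_cons]
      rcases e0 with ⟨xv, bv⟩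
      simp only at hy
      cases bv <;> simp [le_of_lt hy, hy] <;> omega
    have hGB0 : pvGapsBelow ivs [] e0.1 := by
      refine ⟨by simp, by simp, ?_⟩
      intro x hx _ ⟨y, hyx, hcy⟩
      obtain ⟨iv, hiv, hv, h1, _⟩ := hcy
      have : e0.1 ≤ iv.1 := hElow _ ((hEmem _).mpr (pv_eventsOf_mem hiv hv).1)
      omega
    obtain ⟨pL, hppL, hQle, hGBfin⟩ := pvSweepInv ivs Qt []
      (if e0.2 then (1 : Int) else -1) e0.1
      (by rw [hE] at hEpw; exact (List.pairwise_cons.mp hEpw).2)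
      (by rw [hE] at hEpw; exact (List.pairwise_cons.mp hEpw).1)
      hcnt0
      (pv_cov_of_mem_eventsOf ((hEmem e0).mp (by rw [hE]; exact List.mem_cons_self)))
      (fun ev hev => pv_cov_of_mem_eventsOf ((hEmem ev).mp (by rw [hE]; exact List.mem_cons_of_mem _ hev)))
      hGB0
    have hEle : ∀ ev ∈ E, ev.1 ≤ pL := by
      intro ev hev
      rw [hE] at hev
      rcases List.mem_cons.mp hev with rfl | h
      · exact hppL
      · exact hQle ev h
    set gA := (Qt.foldl pvStepA ([], (if e0.2 then (1 : Int) else -1), some e0.1)).1 with hgA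
    have hIsA : pvIsGaps ivs gA := by
      obtain ⟨w1, w2, w3⟩ := hGBfin
      refine ⟨w1, fun ab hab => (w2 ab hab).1, ?_⟩
      intro x hnc hbelow ⟨y, hxy, hcy⟩
      obtain ⟨iv, hiv, hv, _, h2⟩ := hcy
      have : iv.2 ≤ pL := hEle _ ((hEmem _).mpr (pv_eventsOf_mem hiv hv).2)
      exact w3 x (by omega) hnc hbelow
    -- ===== run the merge invariant over rest =====
    have hrestmem : ∀ iv ∈ rest, iv ∈ ivs ∧ iv.1 < iv.2 := by
      intro iv hiv
      exact (hVmem iv).mp (by rw [hV]; exact List.mem_cons_of_mem _ hiv)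
    obtain ⟨i1, i2, i3, i4, i5, i6⟩ := pvMergeInv ivs rest v0.1 v0.2
      (le_of_lt hv0ivs.2)
      (by rw [hV] at hVpw; exact (List.pairwise_cons.mp hVpw).2)
      (fun iv hiv => (hrestmem iv hiv).2)
      (fun iv hiv => hVlow iv (by rw [hV]; exact List.mem_cons_of_mem _ hiv))
      (fun x h1 h2 => ⟨v0, hv0ivs.1, hv0ivs.2, h1, h2⟩)
      (fun iv hiv x h1 h2 => ⟨iv, (hrestmem iv hiv).1, (hrestmem iv hiv).2, h1, h2⟩)
      (by
        intro x hcov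
        obtain ⟨iv, hiv, h1, h2⟩ := (hcovV x).mp hcov
        rw [hV] at hiv
        rcases List.mem_cons.mp hiv with rfl | h
        · exact Or.inl h2
        · exact Or.inr ⟨iv, h, h1, h2⟩)
    set stB := rest.foldl pvStepB ([], v0.2) with hstB
    have hIsB : pvIsGaps ivs stB.1 := by
      refine ⟨i4, fun ab hab => (i5 ab hab).1, ?_⟩
      intro x hnc ⟨y1, hy1x, hcy1⟩ habove
      have hxc : v0.2 < x := by
        by_contra hxc
        by_cases hxl : v0.1 ≤ x
        · exact hnc ⟨v0, hv0ivs.1, hv0ivs.2, hxl, by omega⟩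
        · obtain ⟨iv, hiv, hv, h1, _⟩ := hcy1
          have := hVlow iv ((hVmem iv).mpr ⟨hiv, hv⟩)
          omega
      exact i6 x hxc hnc habove
    -- ===== the gap lists coincide =====
    have hgaps : gA = stB.1 := pvIsGaps_unique hIsA hIsB
    -- ===== the endpoints coincide =====
    have hfirst : e0.1 = v0.1 := by
      have h1 : e0.1 ≤ v0.1 :=
        hElow _ ((hEmem _).mpr (pv_eventsOf_mem hv0ivs.1 hv0ivs.2).1)
      have h2 : v0.1 ≤ e0.1 := by
        obtain ⟨iv, hiv, hv, hc⟩ := pv_mem_eventsOf ((hEmem e0).mp (by rw [hE]; exact List.mem_cons_self))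
        have := hVlow iv ((hVmem iv).mpr ⟨hiv, hv⟩)
        rcases hc with rfl | rfl
        · simpa using this
        · simp only; omega
      omega
    have hlast : eL.1 = stB.2 := by
      have h1 : eL.1 ≤ stB.2 := by
        obtain ⟨iv, hiv, hv, hc⟩ := pv_mem_eventsOf ((hEmem eL).mp heLE)
        have hivV : iv ∈ V := (hVmem iv).mpr ⟨hiv, hv⟩
        have hend : iv.2 ≤ stB.2 := by
          rw [hV] at hivV
          rcases List.mem_cons.mp hivV with rfl | h
          · exact i1
          · exact i2 iv h
        rcases hc with h | h
        · have he : eL.1 = iv.1 := by rw [h]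
          omega
        · have he : eL.1 = iv.2 := by rw [h]
          omega
      have h2 : stB.2 ≤ eL.1 := by
        rcases i3 with h | ⟨iv, hiv, h⟩
        · rw [h]
          exact hEhigh _ ((hEmem _).mpr (pv_eventsOf_mem hv0ivs.1 hv0ivs.2).2)
        · rw [h]
          exact hEhigh _ ((hEmem _).mpr
            (pv_eventsOf_mem (hrestmem iv hiv).1 (hrestmem iv hiv).2).2)
      omega
    -- ===== compute both sides =====
    have hget0E : PySem.List.pyGet? E 0 = some e0 := by
      rw [hE]; simp [PySem.List.pyGet?, PySem.List.pyIdx?]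
    have hgetLE : PySem.List.pyGet? E (-1) = some eL := by
      rw [hsplitE]; exact PySem.List.pyGet?_neg_one_append_singleton _ _
    have hget0V : PySem.List.pyGet? V 0 = some v0 := by
      rw [hV]; simp [PySem.List.pyGet?, PySem.List.pyIdx?]
    have hfoldA : (E.foldl pvStepA ([], 0, none)).1 = gA := by
      rw [hE, List.foldl_cons, hstep0, hgA]
    have hsliceV : (PySem.List.slice V (some 1) none) = rest := by
      rw [PySem.List.slice_from_one, hV]; rfl
    have hA : ComputeComplementOfIntervalUnion ivs = (e0.1 - 1, gA, eL.1 + 1) := by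
      rw [ComputeComplementOfIntervalUnion, if_neg hlen]
      simp only [← hEdef]
      rw [hget0E, hgetLE]
      simp only [hfoldA]
    have hB : ComputeComplementOfIntervalUnion_alt ivs = (v0.1 - 1, stB.1, stB.2 + 1) := by
      rw [ComputeComplementOfIntervalUnion_alt, if_neg hlen]
      simp only [← hFdef, ← hVdef]
      rw [hget0V]
      simp only [hsliceV, ← hstB]
    rw [hA, hB, hgaps, hfirst, hlast]

-- ===== VERDICT (by name: the statement is the Claim_ definition above) =====
theorem ComputeComplementOfIntervalUnion_spec : Claim_equal_ComputeComplementOfIntervalUnion := by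
  intro intervals _ hpre
  unfold Spec_ComputeComplementOfIntervalUnion
  exact pvMain intervals hpre
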